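-- pv_equiv track=rewrite | github.com/TonyEpic/eth-ast-sqlite-fuzzer | src/test_db/executor/process_runner.py | _group_statements
-- ===== SOURCE A (Python) =====
-- from typing import List, Tuple
--
-- _TXN_OPEN_PREFIXES = ("BEGIN",)
--
-- _TXN_CLOSE_PREFIXES = ("COMMIT", "ROLLBACK", "END")
--
-- def _stmt_kind(sql: str) -> str:
--     head = sql.lstrip().upper()
--     if any(head.startswith(p) for p in _TXN_OPEN_PREFIXES):
--         return "open"
--     if any(head.startswith(p) for p in _TXN_CLOSE_PREFIXES):
--         return "close"
--     return "other"
--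
-- def _group_statements(statements: List[str]) -> List[Tuple[int, List[str]]]:
--     """Group statements into execution batches.
--
--     A batch is either a single statement, or a run of consecutive statements
--     delimited by BEGIN ... COMMIT/ROLLBACK/END. An unmatched BEGIN groups
--     everything until the end of the workload. Each returned tuple is
--     (start_idx, [statements_in_batch]).
--     """
--     groups: List[Tuple[int, List[str]]] = []
--     i = 0
--     n = len(statements)
--     while i < n:
--         kind = _stmt_kind(statements[i])
--         if kind != "open":
--             groups.append((i, [statements[i]]))
--             i += 1
--             continue
--
--         # Start of a transaction block. Collect through the matching close.
--         start = i
--         block = [statements[i]]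
--         i += 1
--         while i < n:
--             block.append(statements[i])
--             if _stmt_kind(statements[i]) == "close":
--                 i += 1
--                 break
--             i += 1
--         groups.append((start, block))
--     return groups
-- ===== SOURCE B (Python) =====
-- from typing import List, Tuple
--
-- def _stmt_kind(sql: str) -> str:
--     head = sql.lstrip().upper()
--     if head.startswith("BEGIN"):
--         return "open"
--     if head.startswith(("COMMIT", "ROLLBACK", "END")):
--         return "close"
--     return "other"
--
-- def _group_statements(statements: List[str]) -> List[Tuple[int, List[str]]]:
--     groups: List[Tuple[int, List[str]]] = []
--     block = None
--     start = 0
--     for i, s in enumerate(statements):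
--         kind = _stmt_kind(s)
--         if block is None:
--             if kind == "open":
--                 block = [s]
--                 start = i
--             else:
--                 groups.append((i, [s]))
--         else:
--             block.append(s)
--             if kind == "close":
--                 groups.append((start, block))
--                 block = None
--     if block is not None:
--         groups.append((start, block))
--     return groups
-- ===== Notes on version B (the rewrite author's own statement) =====
-- stated objective: simpler
-- what changed: Replaced A's nested while-loops over an explicit index (with an inner loop consuming the transaction block and returning the resumption index) by a single for-loop over enumerate(statements) that carries an optional block buffer and its start index, flushing on close and once after the loop.
import Mathlib
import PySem

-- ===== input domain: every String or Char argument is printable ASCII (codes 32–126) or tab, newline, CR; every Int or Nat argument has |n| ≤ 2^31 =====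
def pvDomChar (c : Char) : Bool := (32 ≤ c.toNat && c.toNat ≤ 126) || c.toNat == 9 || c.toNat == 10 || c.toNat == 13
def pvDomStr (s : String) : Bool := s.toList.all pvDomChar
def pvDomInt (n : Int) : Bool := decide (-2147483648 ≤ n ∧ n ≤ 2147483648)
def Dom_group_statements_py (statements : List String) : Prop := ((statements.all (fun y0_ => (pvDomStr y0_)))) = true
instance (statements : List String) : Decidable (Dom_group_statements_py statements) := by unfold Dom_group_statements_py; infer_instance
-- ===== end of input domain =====

-- B replaces A's nested while-loops with index machinery by a single enumerate pass
-- maintaining an optional open-block buffer (simpler decomposition, same cost).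

-- ===== PORT A =====
-- _stmt_kind: head = sql.lstrip().upper(); any(head.startswith(p) for p in ("BEGIN",)) → "open";
-- any(… for p in ("COMMIT","ROLLBACK","END")) → "close"; else "other"
def aKind (sql : String) : String :=
  let head := PySem.Str.upper (PySem.Str.lstrip sql)
  if PySem.Str.startswith head "BEGIN" then "open"
  else if PySem.Str.startswith head "COMMIT" || PySem.Str.startswith head "ROLLBACK" ||
          PySem.Str.startswith head "END" then "close"
  else "other"

-- A's inner `while i < n` loop: append statements[i] to block, stop right after a "close"
def aInner (stmts : List String) (i : Nat) (block : List String) : List String × Nat :=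
  if h : i < stmts.length then
    if aKind stmts[i] = "close" then (block ++ [stmts[i]], i + 1)
    else aInner stmts (i + 1) (block ++ [stmts[i]])
  else (block, i)
termination_by stmts.length - i

-- needed only for aOuter's termination
theorem aInner_ge (stmts : List String) : ∀ (d i : Nat) (block : List String),
    stmts.length - i ≤ d → i ≤ (aInner stmts i block).2 := by
  intro d
  induction d with
  | zero =>
    intro i block hle
    rw [aInner, dif_neg (by omega : ¬ i < stmts.length)]
  | succ d ih =>
    intro i block hle
    by_cases h : i < stmts.length
    · rw [aInner, dif_pos h]
      by_cases hk : aKind stmts[i] = "close"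
      · simp [hk]
      · rw [if_neg hk]
        have := ih (i + 1) (block ++ [stmts[i]]) (by omega)
        omega
    · rw [aInner, dif_neg h]

theorem aInner_ge' (stmts : List String) (i : Nat) (block : List String) :
    i ≤ (aInner stmts i block).2 :=
  aInner_ge stmts (stmts.length - i) i block le_rfl

-- A's outer `while i < n` loop over the index i, accumulating groups
def aOuter (stmts : List String) (i : Nat) (groups : List (Int × List String)) :
    List (Int × List String) :=
  if h : i < stmts.length then
    if aKind stmts[i] ≠ "open" then
      aOuter stmts (i + 1) (groups ++ [((i : Int), [stmts[i]])])
    else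
      aOuter stmts (aInner stmts (i + 1) [stmts[i]]).2
        (groups ++ [((i : Int), (aInner stmts (i + 1) [stmts[i]]).1)])
  else groups
termination_by stmts.length - i
decreasing_by
  · omega
  · have := aInner_ge' stmts (i + 1) [stmts[i]]; omega

def group_statements_py (statements : List String) : List (Int × List String) :=
  aOuter statements 0 []

-- ===== PORT B =====
def bKind (sql : String) : String :=
  let head := PySem.Str.upper (PySem.Str.lstrip sql)
  if PySem.Str.startswith head "BEGIN" then "open"
  else if PySem.Str.startswith head "COMMIT" || PySem.Str.startswith head "ROLLBACK" ||
          PySem.Str.startswith head "END" then "close"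
  else "other"

-- B's `for i, s in enumerate(statements)` loop with state (groups, start, block);
-- the trailing `if block is not None` flush is the [] case.
def bLoop (ps : List (Int × String)) (groups : List (Int × List String)) (start : Int)
    (block : Option (List String)) : List (Int × List String) :=
  match ps with
  | [] =>
    match block with
    | none => groups
    | some b => groups ++ [(start, b)]
  | (i, s) :: rest =>
    match block with
    | none =>
      if bKind s = "open" then bLoop rest groups i (some [s])
      else bLoop rest (groups ++ [(i, [s])]) start none
    | some b =>
      if bKind s = "close" then bLoop rest (groups ++ [(start, b ++ [s])]) start none
      else bLoop rest groups start (some (b ++ [s]))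

def group_statements_py_alt (statements : List String) : List (Int × List String) :=
  bLoop (PySem.List.enumerate statements 0) [] 0 none

-- ===== PRECONDITION & SPEC =====
def Spec_group_statements_py (statements : List String) (out : List (Int × List String)) : Prop := out = group_statements_py_alt statements
instance (statements : List String) (out : List (Int × List String)) : Decidable (Spec_group_statements_py statements out) := by unfold Spec_group_statements_py; infer_instance

-- ===== CLAIM (what is proved, stated in full; the proofs are below) =====
def Claim_equal_group_statements_py : Prop := ∀ (statements : List String), Dom_group_statements_py statements → Spec_group_statements_py statements (group_statements_py statements)

-- ===== LEMMAS AND PROOFS =====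

theorem bKind_eq (s : String) : bKind s = aKind s := rfl

-- the suffix of the enumerated list starting at index i
def enumFrom (stmts : List String) (i : Nat) : List (Int × String) :=
  if h : i < stmts.length then ((i : Int), stmts[i]) :: enumFrom stmts (i + 1) else []
termination_by stmts.length - i

theorem enumFrom_eq (stmts : List String) : ∀ (d i : Nat), stmts.length - i ≤ d →
    PySem.List.enumerate (stmts.drop i) (i : Int) = enumFrom stmts i := by
  intro d
  induction d with
  | zero =>
    intro i hle
    have h : ¬ i < stmts.length := by omega
    rw [enumFrom, dif_neg h, List.drop_of_length_le (by omega)]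
    rfl
  | succ d ih =>
    intro i hle
    by_cases h : i < stmts.length
    · rw [enumFrom, dif_pos h, List.drop_eq_getElem_cons h, PySem.List.enumerate_cons]
      rw [show ((i : Int) + 1) = ((i + 1 : Nat) : Int) by push_cast; ring, ih (i + 1) (by omega)]
    · rw [enumFrom, dif_neg h, List.drop_of_length_le (by omega)]
      rfl

-- A's outer loop (in either of its two states: outside a block, or with the inner loop
-- running on block) computes what B's single pass computes on the remaining suffix.
theorem key (stmts : List String) : ∀ (d i : Nat), stmts.length - i ≤ d →
    (∀ groups start, aOuter stmts i groups = bLoop (enumFrom stmts i) groups start none) ∧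
    (∀ block groups start,
       aOuter stmts (aInner stmts i block).2 (groups ++ [(start, (aInner stmts i block).1)])
         = bLoop (enumFrom stmts i) groups start (some block)) := by
  intro d
  induction d with
  | zero =>
    intro i hle
    have h : ¬ i < stmts.length := by omega
    rw [enumFrom, dif_neg h]
    constructor
    · intro groups start
      rw [aOuter, dif_neg h]; rfl
    · intro block groups start
      rw [aInner, dif_neg h]
      show aOuter stmts i (groups ++ [(start, block)]) = _
      rw [aOuter, dif_neg h]
      rfl
  | succ d ih =>
    intro i hle
    by_cases h : i < stmts.length
    · have hstep := ih (i + 1) (by omega)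
      rw [enumFrom, dif_pos h]
      constructor
      · intro groups start
        rw [aOuter, dif_pos h]
        by_cases hk : aKind stmts[i] = "open"
        · rw [if_neg (not_not_intro hk), hstep.2 [stmts[i]] groups (i : Int)]
          simp [bLoop, bKind_eq, hk]
        · rw [if_pos hk, hstep.1 (groups ++ [((i : Int), [stmts[i]])]) start]
          simp [bLoop, bKind_eq, hk]
      · intro block groups start
        rw [aInner, dif_pos h]
        by_cases hk : aKind stmts[i] = "close"
        · rw [if_pos hk]
          show aOuter stmts (i + 1) (groups ++ [(start, block ++ [stmts[i]])]) = _
          rw [hstep.1 (groups ++ [(start, block ++ [stmts[i]])]) start]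
          simp [bLoop, bKind_eq, hk]
        · rw [if_neg hk, hstep.2 (block ++ [stmts[i]]) groups start]
          simp [bLoop, bKind_eq, hk]
    · rw [enumFrom, dif_neg h]
      constructor
      · intro groups start
        rw [aOuter, dif_neg h]; rfl
      · intro block groups start
        rw [aInner, dif_neg h]
        show aOuter stmts i (groups ++ [(start, block)]) = _
        rw [aOuter, dif_neg h]
        rfl

-- ===== VERDICT (by name: the statement is the Claim_ definition above) =====
theorem group_statements_py_spec : Claim_equal_group_statements_py := by
  intro statements _
  unfold Spec_group_statements_py group_statements_py group_statements_py_alt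
  rw [show PySem.List.enumerate statements 0 = enumFrom statements 0 by
        simpa using enumFrom_eq statements statements.length 0 (by omega)]
  exact (key statements statements.length 0 (by omega)).1 [] 0
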